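-- pv_equiv track=rewrite | github.com/wilmurillo-ai/Design-Assistant | .skills/openclaw-skills/skills/horace-claw/sequential-read/scripts/chunk_manager.py | find_scene_breaks
-- ===== SOURCE A (Python) =====
-- def find_scene_breaks(lines):
--     breaks = []
--     blank_count = 0
--     for i, line in enumerate(lines):
--         if not line.strip():
--             blank_count += 1
--         else:
--             if blank_count >= 2:
--                 breaks.append(i - blank_count)
--             blank_count = 0
--     return breaks
-- ===== SOURCE B (Python) =====
-- def find_scene_breaks(lines):
--     # Run-length decomposition: group the blank/non-blank flags into maximal
--     # runs, then emit the start of every blank run of length >= 2 that is not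
--     # the final run (a trailing blank run is never followed by text).
--     flags = [not line.strip() for line in lines]
--     groups = []  # (is_blank, start, length)
--     i = 0
--     n = len(flags)
--     while i < n:
--         j = i + 1
--         while j < n and flags[j] == flags[i]:
--             j += 1
--         groups.append((flags[i], i, j - i))
--         i = j
--     return [start for (is_blank, start, length) in groups[:-1]
--             if is_blank and length >= 2]
-- ===== Notes on version B (the rewrite author's own statement) =====
-- stated objective: alternative
-- what changed: B replaces A's single stateful scan (blank counter reset on text) by a run-length decomposition: it groups lines into maximal blank/non-blank runs and emits the start of every blank run of length >= 2 except a trailing one.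
import Mathlib
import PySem

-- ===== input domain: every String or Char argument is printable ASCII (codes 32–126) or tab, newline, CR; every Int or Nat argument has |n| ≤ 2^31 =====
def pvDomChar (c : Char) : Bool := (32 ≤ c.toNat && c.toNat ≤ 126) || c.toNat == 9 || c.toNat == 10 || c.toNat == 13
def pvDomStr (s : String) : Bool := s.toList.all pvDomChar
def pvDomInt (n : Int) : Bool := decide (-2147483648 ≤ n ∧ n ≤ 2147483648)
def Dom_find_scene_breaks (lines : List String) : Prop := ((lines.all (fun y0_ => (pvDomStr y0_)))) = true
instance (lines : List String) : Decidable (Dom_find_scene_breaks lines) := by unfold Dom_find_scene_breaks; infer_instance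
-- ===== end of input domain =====

-- B replaces A's single stateful scan (blank counter reset at each text line) by a run-length
-- decomposition into maximal blank/non-blank runs; same cost, different decomposition.


-- shared helper: Python's `not line.strip()` (line is blank/whitespace-only)
def pvBlank (l : String) : Bool := PySem.Str.strip l == ""

-- ===== PORT A =====
-- for i, line in enumerate(lines): stateful fold with state (breaks, blank_count)
def find_scene_breaks (lines : List String) : List Int :=
  ((PySem.List.enumerate lines).foldl
    (fun (st : List Int × Int) (p : Int × String) =>
      if pvBlank p.2 then (st.1, st.2 + 1)
      else ((if st.2 ≥ 2 then st.1 ++ [p.1 - st.2] else st.1), 0))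
    ([], 0)).1

-- ===== PORT B =====
-- inner `while j < n and flags[j] == flags[i]` = takeWhile/dropWhile on the rest
def pvGroups : List Bool → Int → List (Bool × Int × Int)
  | [], _ => []
  | f :: rest, i =>
    (f, i, ((rest.takeWhile (· == f)).length : Int) + 1)
      :: pvGroups (rest.dropWhile (· == f)) (i + (rest.takeWhile (· == f)).length + 1)
termination_by flags _ => flags.length
decreasing_by
  simpa using Nat.lt_succ_of_le (List.length_dropWhile_le (· == f) rest)

def find_scene_breaks_alt (lines : List String) : List Int :=
  let flags := lines.map pvBlank
  let groups := pvGroups flags 0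
  groups.dropLast.filterMap
    (fun g => if g.1 = true ∧ 2 ≤ g.2.2 then some g.2.1 else none)

-- ===== PRECONDITION & SPEC =====
def Spec_find_scene_breaks (lines : List String) (out : List Int) : Prop := out = find_scene_breaks_alt lines
instance (lines : List String) (out : List Int) : Decidable (Spec_find_scene_breaks lines out) := by unfold Spec_find_scene_breaks; infer_instance

-- ===== CLAIM (what is proved, stated in full; the proofs are below) =====
def Claim_equal_find_scene_breaks : Prop := ∀ (lines : List String), Dom_find_scene_breaks lines → Spec_find_scene_breaks lines (find_scene_breaks lines)

-- ===== LEMMAS AND PROOFS =====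

-- A's loop over the blank flags, emits only (index i, pending blank count bc)
def loopA : List Bool → Int → Int → List Int
  | [], _, _ => []
  | f :: rest, i, bc =>
    if f then loopA rest (i + 1) (bc + 1)
    else (if bc ≥ 2 then [i - bc] else []) ++ loopA rest (i + 1) 0

-- what B emits from a group list
def emitB (gs : List (Bool × Int × Int)) : List Int :=
  gs.dropLast.filterMap (fun g => if g.1 = true ∧ 2 ≤ g.2.2 then some g.2.1 else none)

lemma foldA_eq_loopA (ls : List String) (i : Int) (acc : List Int) (bc : Int) :
    ((PySem.List.enumerate ls i).foldl
      (fun (st : List Int × Int) (p : Int × String) =>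
        if pvBlank p.2 then (st.1, st.2 + 1)
        else ((if st.2 ≥ 2 then st.1 ++ [p.1 - st.2] else st.1), 0))
      (acc, bc)).1 = acc ++ loopA (ls.map pvBlank) i bc := by
  induction ls generalizing i acc bc with
  | nil => simp [PySem.List.enumerate_nil, loopA]
  | cons l rest ih =>
    simp only [PySem.List.enumerate_cons, List.foldl_cons, List.map_cons, loopA]
    by_cases hb : pvBlank l
    · simp [hb, ih]
    · simp only [hb, if_false, Bool.false_eq_true]
      by_cases h2 : bc ≥ 2
      · simp [h2, ih, List.append_assoc]
      · simp [h2, ih]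

lemma loopA_trues (run : List Bool) (h : ∀ x ∈ run, x = true) :
    ∀ (rest : List Bool) (i bc : Int),
      loopA (run ++ rest) i bc = loopA rest (i + run.length) (bc + run.length) := by
  induction run with
  | nil => intro rest i bc; simp
  | cons a t ih =>
    intro rest i bc
    have ha : a = true := h a (by simp)
    have ht : ∀ x ∈ t, x = true := fun x hx => h x (by simp [hx])
    simp only [List.cons_append, loopA, ha, if_true]
    rw [ih ht rest (i + 1) (bc + 1)]
    congr 1 <;> · push_cast [List.length_cons]; ring

lemma loopA_falses (run : List Bool) (h : ∀ x ∈ run, x = false) :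
    ∀ (rest : List Bool) (i : Int),
      loopA (run ++ rest) i 0 = loopA rest (i + run.length) 0 := by
  induction run with
  | nil => intro rest i; simp
  | cons a t ih =>
    intro rest i
    have ha : a = false := h a (by simp)
    have ht : ∀ x ∈ t, x = false := fun x hx => h x (by simp [hx])
    simp only [List.cons_append, loopA, ha]
    norm_num
    rw [ih ht rest (i + 1)]
    congr 1
    push_cast; ring

lemma pvGroups_ne_nil (f : Bool) (rest : List Bool) (i : Int) :
    pvGroups (f :: rest) i ≠ [] := by
  rw [pvGroups]; simp

-- main invariant: A's loop with pending count 0 computes B's emission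
lemma loopA_eq_emitB : ∀ (n : Nat) (flags : List Bool), flags.length ≤ n →
    ∀ (i : Int), loopA flags i 0 = emitB (pvGroups flags i) := by
  intro n
  induction n with
  | zero =>
    intro flags hn i
    have : flags = [] := List.eq_nil_of_length_eq_zero (Nat.le_zero.mp hn)
    subst this; simp [loopA, pvGroups, emitB]
  | succ n ih =>
    intro flags hn i
    match flags with
    | [] => simp [loopA, pvGroups, emitB]
    | f :: rest =>
      have hmem : ∀ x ∈ rest.takeWhile (· == f), x = f := fun x hx => by
        simpa using List.mem_takeWhile_imp hx
      have hhead : ∀ b t, rest.dropWhile (· == f) = b :: t → b ≠ f := by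
        intro b t hbt hb
        have := List.head?_dropWhile_not (p := (· == f)) (l := rest)
        rw [hbt] at this
        simp [hb] at this
      have hsplit : rest.takeWhile (· == f) ++ rest.dropWhile (· == f) = rest :=
        List.takeWhile_append_dropWhile
      have hlen' : (rest.dropWhile (· == f)).length ≤ n := by
        have h1 := List.length_dropWhile_le (· == f) rest
        have h2 : rest.length ≤ n := by simpa using hn
        omega
      rw [pvGroups]
      generalize hRun : rest.takeWhile (· == f) = run at hmem hsplit ⊢
      generalize hRest : rest.dropWhile (· == f) = rest' at hhead hsplit hlen' ⊢
      rw [← hsplit]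
      cases f with
      | false =>
        have hstep : loopA (false :: (run ++ rest')) i 0 = loopA rest' (i + run.length + 1) 0 := by
          rw [show (false :: (run ++ rest')) = (false :: run) ++ rest' by simp]
          rw [loopA_falses (false :: run)
            (by intro x hx; rcases List.mem_cons.mp hx with h | h; exact h; exact hmem x h)]
          congr 1
          push_cast [List.length_cons]; ring
        rw [hstep, ih rest' hlen' (i + run.length + 1)]
        cases rest' with
        | nil => simp [pvGroups, emitB]
        | cons b t =>
          cases hr : pvGroups (b :: t) (i + run.length + 1) with
          | nil => exact absurd hr (pvGroups_ne_nil b t _)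
          | cons g gs => simp [emitB]
      | true =>
        have hstep : loopA (true :: (run ++ rest')) i 0
            = loopA rest' (i + run.length + 1) ((run.length : Int) + 1) := by
          rw [show (true :: (run ++ rest')) = (true :: run) ++ rest' by simp]
          rw [loopA_trues (true :: run)
            (by intro x hx; rcases List.mem_cons.mp hx with h | h; exact h; exact hmem x h)]
          congr 1 <;> · push_cast [List.length_cons]; ring
        rw [hstep]
        cases rest' with
        | nil => simp [loopA, pvGroups, emitB]
        | cons b t =>
          have hb : b = false := by
            have := hhead b t rfl
            cases b
            · rfl
            · exact absurd rfl this
          subst hb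
          have e1 : loopA (false :: t) (i + run.length + 1) ((run.length : Int) + 1)
              = (if (run.length : Int) + 1 ≥ 2 then [i] else [])
                ++ loopA t (i + run.length + 1 + 1) 0 := by
            rw [loopA]
            simp only [Bool.false_eq_true, if_false]
            rw [show i + (run.length : Int) + 1 - ((run.length : Int) + 1) = i by ring]
          have e2 : loopA (false :: t) (i + run.length + 1) 0
              = loopA t (i + run.length + 1 + 1) 0 := by
            rw [loopA]; norm_num
          rw [e1, ← e2, ih (false :: t) hlen' (i + run.length + 1)]
          cases hr : pvGroups (false :: t) (i + run.length + 1) with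
          | nil => exact absurd hr (pvGroups_ne_nil _ _ _)
          | cons g gs =>
            rw [← hr]
            simp only [emitB,
              List.dropLast_cons_of_ne_nil (by simp [hr] :
                pvGroups (false :: t) (i + (run.length : Int) + 1) ≠ []),
              List.filterMap_cons]
            split_ifs with h h' h'
            · simp
            · exact absurd ⟨trivial, h⟩ h'
            · exact absurd h'.2 (by omega)
            · simp

-- ===== VERDICT (by name: the statement is the Claim_ definition above) =====
theorem find_scene_breaks_spec : Claim_equal_find_scene_breaks := by
  intro lines _
  show find_scene_breaks lines = find_scene_breaks_alt lines
  unfold find_scene_breaks find_scene_breaks_alt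
  rw [foldA_eq_loopA lines 0 [] 0, List.nil_append,
      loopA_eq_emitB (lines.map pvBlank).length _ le_rfl 0]
  rfl
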